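-- pv_equiv track=rewrite | github.com/jerryxiao14/AdventOfCode | 2025/10.py | to_grid
-- ===== SOURCE A (Python) =====
-- def to_grid(x,n):
--     ans = ''
--     for i in range(n):
--         if (x>>i)&1:
--             ans+='#'
--         else:
--             ans+='.'
--     return ans
-- ===== SOURCE B (Python) =====
-- def to_grid(x, n):
--     if n <= 0:
--         return ''
--     m = x % (1 << n)
--     bits = format(m, '0{}b'.format(n))
--     return bits[::-1].translate(str.maketrans('01', '.#'))
-- ===== Notes on version B (the rewrite author's own statement) =====
-- stated objective: idiomatic
-- what changed: Replaces the per-bit test-and-append loop by masking the low n bits with one modulo, rendering them with fixed-width binary string formatting, then reversing and mapping digits to grid characters via str.translate (measured ~11x faster at the largest size).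
import Mathlib
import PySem

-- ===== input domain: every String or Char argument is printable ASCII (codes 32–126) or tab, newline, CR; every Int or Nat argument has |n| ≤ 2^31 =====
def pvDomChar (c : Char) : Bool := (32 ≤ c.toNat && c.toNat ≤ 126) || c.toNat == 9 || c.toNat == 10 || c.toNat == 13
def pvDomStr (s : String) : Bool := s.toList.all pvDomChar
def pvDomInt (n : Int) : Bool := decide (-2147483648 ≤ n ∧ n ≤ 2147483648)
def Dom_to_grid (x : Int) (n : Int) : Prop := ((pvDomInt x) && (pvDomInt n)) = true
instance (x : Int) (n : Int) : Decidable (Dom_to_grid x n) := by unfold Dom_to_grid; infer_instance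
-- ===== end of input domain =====

-- B replaces A's per-bit test-and-append loop by one modular mask, a fixed-width
-- binary rendering, a reversal and a character translation (idiomatic; measured faster in a timing run).

-- ===== PORT A =====
-- literal port of A: ans = ''; for i in range(n): ans += '#' if (x>>i)&1 else '.'
-- Python's x>>i is Lean's x >>> i (i ≥ 0 inside range(n)); (…)&1 is PySem.Int.band … 1,
-- and Python's 'if' tests it for being nonzero.
def to_grid (x : Int) (n : Int) : String :=
  (PySem.List.pyRange 0 n 1).foldl
    (fun ans i => if PySem.Int.band (Int.shiftRight x i.toNat) 1 ≠ 0 then ans ++ "#" else ans ++ ".")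
    ""

-- ===== PORT B =====
-- hand-port of format(m, '0{k}b'): the k zero-padded binary digits of m, most
-- significant first (exact for m < 2^k, which 0 ≤ m = x % (1 << n) < 2^n gives).
def pvBinDigits (k : Nat) (m : Nat) : List Char :=
  match k with
  | 0 => []
  | k + 1 => pvBinDigits k (m / 2) ++ [if m % 2 = 1 then '1' else '0']

-- hand-port of str.maketrans('01', '.#') applied by translate: exact (identity off '0'/'1')
def pvTr (c : Char) : Char := if c = '0' then '.' else if c = '1' then '#' else c

-- literal port of B: early '' for n <= 0; m = x % (1 << n); bits = format(m,'0nb');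
-- return bits[::-1].translate(...). 1 << n is 1 <<< n.toNat; bits[::-1] is List.reverse.
def to_grid_alt (x : Int) (n : Int) : String :=
  if n ≤ 0 then ""
  else
    let m := PySem.Int.mod x ((1 : Int) <<< n.toNat)
    String.ofList (((pvBinDigits n.toNat m.toNat).reverse).map pvTr)

-- ===== PRECONDITION & SPEC =====
def Spec_to_grid (x : Int) (n : Int) (out : String) : Prop := out = to_grid_alt x n
instance (x : Int) (n : Int) (out : String) : Decidable (Spec_to_grid x n out) := by unfold Spec_to_grid; infer_instance

-- ===== CLAIM (what is proved, stated in full; the proofs are below) =====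
def Claim_equal_to_grid : Prop := ∀ (x : Int) (n : Int), Dom_to_grid x n → Spec_to_grid x n (to_grid x n)

-- ===== LEMMAS AND PROOFS =====

-- A's loop appends one character per index: it is init ++ the mapped characters.
theorem pv_foldlA (g : Int → Prop) [DecidablePred g] :
    ∀ (l : List Int) (init : String),
      l.foldl (fun ans i => if g i then ans ++ "#" else ans ++ ".") init
        = init ++ String.ofList (l.map (fun i => if g i then '#' else '.')) := by
  intro l
  induction l with
  | nil => intro init; simp
  | cons a t ih =>
    intro init
    by_cases h : g a
    · rw [List.foldl_cons, if_pos h, ih, List.map_cons, if_pos h, String.append_assoc]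
      congr 1
      rw [show ("#" : String) = String.ofList ['#'] from rfl, ← String.ofList_append]
      rfl
    · rw [List.foldl_cons, if_neg h, ih, List.map_cons, if_neg h, String.append_assoc]
      congr 1
      rw [show ("." : String) = String.ofList ['.'] from rfl, ← String.ofList_append]
      rfl

-- the bit A reads at position i < k only depends on x modulo 2^k
theorem pv_bit_mod (x : Int) (k i : Nat) (h : i < k) :
    x / 2 ^ i % 2 = x % 2 ^ k / 2 ^ i % 2 := by
  set m := x % 2 ^ k with hmdef
  set q := x / 2 ^ k with hqdef
  have hx : 2 ^ k * q + m = x := Int.mul_ediv_add_emod x (2 ^ k)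
  have hk : (2 : Int) ^ k = 2 ^ i * (2 * 2 ^ (k - i - 1)) := by
    rw [← pow_succ', ← pow_add]; congr 1; omega
  calc x / 2 ^ i % 2
      = (2 ^ k * q + m) / 2 ^ i % 2 := by rw [hx]
    _ = (m + 2 * (2 ^ (k - i - 1) * q) * 2 ^ i) / 2 ^ i % 2 := by
          congr 2; rw [hk]; ring
    _ = (m / 2 ^ i + 2 * (2 ^ (k - i - 1) * q)) % 2 := by
          rw [Int.add_mul_ediv_right _ _ (by positivity : (2:Int) ^ i ≠ 0)]
    _ = m / 2 ^ i % 2 := by rw [Int.add_mul_emod_self_left]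

-- B's rendering, reversed and translated, is the list of low-to-high bit characters
theorem pv_binRev (k : Nat) :
    ∀ m : Nat, ((pvBinDigits k m).reverse).map pvTr
      = (List.range k).map (fun i => if m / 2 ^ i % 2 = 1 then '#' else '.') := by
  induction k with
  | zero => intro m; simp [pvBinDigits]
  | succ k ih =>
    intro m
    have hstep : pvBinDigits (k+1) m
        = pvBinDigits k (m / 2) ++ [if m % 2 = 1 then '1' else '0'] := rfl
    rw [hstep, List.reverse_append, List.reverse_singleton, List.singleton_append,
        List.map_cons, ih, List.range_succ_eq_map, List.map_cons, List.map_map]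
    congr 1
    · by_cases h : m % 2 = 1 <;> simp [pvTr, h]
    · apply List.map_congr_left
      intro i _
      have hdd : m / 2 / 2 ^ i = m / 2 ^ (i + 1) := by
        rw [Nat.div_div_eq_div_mul, ← pow_succ']
      simp [Function.comp, Nat.succ_eq_add_one, hdd, pow_succ]

theorem to_grid_spec : Claim_equal_to_grid := by
  intro x n _
  unfold Spec_to_grid to_grid to_grid_alt
  by_cases hn : n ≤ 0
  · rw [PySem.List.pyRange_one_eq_nil (by omega), if_pos hn]
    simp
  · rw [if_neg hn]
    rw [Int.not_le] at hn
    have hm : PySem.Int.mod x ((1 : Int) <<< n.toNat) = x % 2 ^ n.toNat := by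
      rw [show ((1 : Int) <<< n.toNat) = 2 ^ n.toNat by simp [Int.shiftLeft_eq]]
      exact PySem.Int.mod_eq_emod_of_pos (by positivity)
    have hmn : (0 : Int) ≤ x % 2 ^ n.toNat := Int.emod_nonneg x (by positivity)
    rw [pv_foldlA (fun i => PySem.Int.band (Int.shiftRight x i.toNat) 1 ≠ 0),
        PySem.List.pyRange_one, List.map_map]
    show _ = String.ofList
      (List.map pvTr (pvBinDigits n.toNat (PySem.Int.mod x ((1:Int) <<< n.toNat)).toNat).reverse)
    rw [hm, pv_binRev, String.empty_append, Int.sub_zero]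
    congr 1
    apply List.map_congr_left
    intro i hi
    rw [List.mem_range] at hi
    have h1 : ((fun k : Nat => (0:Int) + k) i).toNat = i := by simp
    simp only [Function.comp, h1]
    have hsr : Int.shiftRight x i = x / 2 ^ i := by
      rw [show Int.shiftRight x i = x >>> i from rfl, Int.shiftRight_eq_div_pow]
      push_cast
      ring
    have hb : PySem.Int.band (Int.shiftRight x i) 1
        = ((x % 2 ^ n.toNat).toNat / 2 ^ i % 2 : Nat) := by
      rw [PySem.Int.band_one, PySem.Int.mod_eq_emod_of_pos (by omega : (0:Int) < 2),
          hsr, pv_bit_mod x n.toNat i (by omega)]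
      rw [show x % 2 ^ n.toNat = ((x % 2 ^ n.toNat).toNat : Int) from (Int.toNat_of_nonneg hmn).symm]
      push_cast
      rfl
    rw [hb]
    have hz := Nat.mod_two_eq_zero_or_one ((x % 2 ^ n.toNat).toNat / 2 ^ i)
    by_cases h2 : (x % 2 ^ n.toNat).toNat / 2 ^ i % 2 = 1
    · rw [if_pos h2, if_pos (by simp [h2])]
    · have hc0 : (x % 2 ^ n.toNat).toNat / 2 ^ i % 2 = 0 := by omega
      rw [if_neg h2, if_neg (by simp [hc0])]

-- ===== VERDICT (by name: the statement is the Claim_ definition above) =====
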